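-- pv_equiv track=rewrite | github.com/varadharaj213/DigitizersAcademy | fronend/main.py | is_repetitive
-- ===== SOURCE A (Python) =====
-- def is_repetitive(text):
--     # Detect sentences or phrases that repeat within the same paragraph
--     words = text.split()
--     if len(words) < 10:  # Skip very short texts
--         return False
--
--     # Check for repeating patterns within the text
--     segments = []
--     for i in range(len(words) - 3):
--         segments.append(" ".join(words[i:i+3]))
--
--     # Count occurrences of each 3-word segment
--     counts = {}
--     for segment in segments:
--         counts[segment] = counts.get(segment, 0) + 1
--
--     # If any 3-word segment occurs more than twice, consider it repetitive
--     for segment, count in counts.items():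
--         if count > 2 and len(segment) > 10:  # Avoid counting common short phrases
--             return True
--
--     return False
-- ===== SOURCE B (Python) =====
-- def is_repetitive(text):
--     # Sort-then-scan: sort the 3-word segments, then a single pass looking for
--     # three consecutive equal segments (no counting structure at all).
--     words = text.split()
--     if len(words) < 10:
--         return False
--     segs = sorted(" ".join(words[i:i+3]) for i in range(len(words) - 3))
--     for i in range(len(segs) - 2):
--         if segs[i] == segs[i+1] == segs[i+2] and len(segs[i]) > 10:
--             return True
--     return False
-- ===== Notes on version B (the rewrite author's own statement) =====
-- stated objective: alternative
-- what changed: B replaces A's dictionary counting with sort-then-scan: it sorts the list of 3-word segments and returns True exactly when three consecutive sorted segments are equal and longer than 10 characters, so no counter is ever built.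
import Mathlib
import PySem

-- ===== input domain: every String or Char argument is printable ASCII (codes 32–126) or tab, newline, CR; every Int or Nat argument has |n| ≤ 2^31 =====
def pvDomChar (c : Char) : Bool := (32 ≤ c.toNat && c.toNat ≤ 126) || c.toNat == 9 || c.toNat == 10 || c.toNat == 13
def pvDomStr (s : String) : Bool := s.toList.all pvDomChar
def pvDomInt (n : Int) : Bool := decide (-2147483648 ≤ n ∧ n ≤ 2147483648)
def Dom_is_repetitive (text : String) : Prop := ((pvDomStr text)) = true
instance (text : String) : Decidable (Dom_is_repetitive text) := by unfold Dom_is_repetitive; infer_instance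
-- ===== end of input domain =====

-- B replaces A's dictionary counting with sort-then-scan: sort the 3-word segments and look for three consecutive equal long segments (objective: alternative; not faster).

-- ===== PORT A =====
def is_repetitive (text : String) : Bool :=
  let words := PySem.Str.split₀ text
  if words.length < 10 then false
  else
    -- segments built by an append loop over range(len(words) - 3)
    let segments := (PySem.List.pyRange 0 ((words.length : Int) - 3) 1).foldl
      (fun acc i => acc ++ [PySem.Str.join " " (PySem.List.slice words (some i) (some (i + 3)))]) []
    -- counts[segment] = counts.get(segment, 0) + 1
    let counts := segments.foldl
      (fun d s => d.insert s (d.getD s 0 + 1)) (PySem.Dict.empty (κ := String) (ν := Int))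
    -- for segment, count in counts.items(): if count > 2 and len(segment) > 10: return True
    counts.items.foldl (fun ok p => if 2 < p.2 && 10 < PySem.Str.len p.1 then true else ok) false

-- ===== PORT B =====
-- the index loop 'for i in range(len(segs) - 2): if segs[i] == segs[i+1] == segs[i+2] and len(segs[i]) > 10'
-- as the obvious structural recursion over the sorted list
def pvScan3 : List String → Bool
  | a :: b :: c :: t =>
      if a == b && b == c && 10 < PySem.Str.len a then true else pvScan3 (b :: c :: t)
  | _ => false

def is_repetitive_alt (text : String) : Bool :=
  let words := PySem.Str.split₀ text
  if words.length < 10 then false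
  else
    let segs := PySem.List.sorted
      ((List.range (words.length - 3)).map
        (fun (i : Nat) => PySem.Str.join " " (PySem.List.slice words (some (i : Int)) (some ((i : Int) + 3)))))
      (fun s => s) false
    pvScan3 segs

-- ===== PRECONDITION & SPEC =====
def Spec_is_repetitive (text : String) (out : Bool) : Prop := out = is_repetitive_alt text
instance (text : String) (out : Bool) : Decidable (Spec_is_repetitive text out) := by unfold Spec_is_repetitive; infer_instance

-- ===== CLAIM (what is proved, stated in full; the proofs are below) =====
def Claim_equal_is_repetitive : Prop := ∀ (text : String), Dom_is_repetitive text → Spec_is_repetitive text (is_repetitive text)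

-- ===== LEMMAS AND PROOFS =====

-- forward: if the scan fires, some segment occurs >= 3 times and is long
theorem pvScan3_exists (l : List String) (h : pvScan3 l = true) :
    ∃ s, 3 ≤ l.count s ∧ 10 < PySem.Str.len s := by
  induction l using pvScan3.induct with
  | case1 a b c t hcond =>
    simp only [Bool.and_eq_true, beq_iff_eq, decide_eq_true_eq] at hcond
    obtain ⟨⟨hab, hbc⟩, hlen⟩ := hcond
    refine ⟨a, ?_, hlen⟩
    subst hab; subst hbc
    simp
  | case2 a b c t hcond ih =>
    rw [pvScan3, if_neg hcond] at h
    obtain ⟨s, hc, hl⟩ := ih h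
    refine ⟨s, le_trans hc ?_, hl⟩
    simp only [List.count_cons]
    omega
  | case3 l hnot =>
    exfalso
    rcases l with _ | ⟨a, _ | ⟨b, _ | ⟨c, t⟩⟩⟩
    · simp [pvScan3] at h
    · simp [pvScan3] at h
    · simp [pvScan3] at h
    · exact hnot a b c t rfl

-- in a sorted list, a head bounded both ways by s and containing s starts with s
theorem pvSorted_head_eq (a : String) (t : List String)
    (hp : (a :: t).Pairwise (· ≤ ·)) (s : String) (hsa : s ≤ a) (hmem : s ∈ a :: t) :
    a = s := by
  rcases List.mem_cons.mp hmem with h | h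
  · exact h.symm
  · exact le_antisymm ((List.pairwise_cons.mp hp).1 s h) hsa

-- backward: in a sorted list a long segment occurring >= 3 times makes the scan fire
theorem pvScan3_of_count (l : List String) (hp : l.Pairwise (· ≤ ·))
    (s : String) (hc : 3 ≤ l.count s) (hl : 10 < PySem.Str.len s) :
    pvScan3 l = true := by
  induction l using pvScan3.induct with
  | case1 a b c t hcond => rw [pvScan3, if_pos hcond]
  | case2 a b c t hcond ih =>
    rw [pvScan3, if_neg hcond]
    by_cases has : a = s
    · exfalso
      subst has
      have hcb : 2 ≤ (b :: c :: t).count a := by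
        have h1 : (a :: b :: c :: t).count a = (b :: c :: t).count a + 1 := by
          simp [List.count_cons]
        omega
      have hb : b = a := by
        refine pvSorted_head_eq b (c :: t) hp.of_cons a ((List.pairwise_cons.mp hp).1 b (by simp)) ?_
        exact List.count_pos_iff.mp (by omega)
      have hcc : 1 ≤ (c :: t).count a := by
        have h2 : (b :: c :: t).count a = (c :: t).count a + 1 := by
          simp [List.count_cons, hb]
        omega
      have hc' : c = a := by
        refine pvSorted_head_eq c t hp.of_cons.of_cons a ?_ (List.count_pos_iff.mp (by omega))
        subst hb
        exact (List.pairwise_cons.mp hp.of_cons).1 c (by simp)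
      apply hcond
      simp only [hb, hc', BEq.rfl, Bool.and_self, Bool.true_and, decide_eq_true_eq]
      exact hl
    · refine ih hp.of_cons ?_
      have h3 : (a :: b :: c :: t).count s = (b :: c :: t).count s := by
        simp only [List.count_cons]
        simp [has]
      omega
  | case3 l hnot =>
    exfalso
    rcases l with _ | ⟨a, _ | ⟨b, _ | ⟨c, t⟩⟩⟩
    · simp at hc
    · simp only [List.count_cons, List.count_nil] at hc
      split_ifs at hc <;> omega
    · simp only [List.count_cons, List.count_nil] at hc
      split_ifs at hc <;> omega
    · exact hnot a b c t rfl

theorem is_repetitive_eq_alt (text : String) : is_repetitive text = is_repetitive_alt text := by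
  unfold is_repetitive is_repetitive_alt
  set words := PySem.Str.split₀ text with hw
  by_cases h : words.length < 10
  · simp [h]
  · simp only [h, if_false]
    have hcast : ((words.length : Int) - 3) = ((words.length - 3 : Nat) : Int) := by omega
    rw [hcast, PySem.List.pyRange_zero_natCast, List.foldl_map,
        PySem.List.foldl_append_singleton_eq_map, List.nil_append,
        PySem.Dict.foldl_insert_getD_add_one_eq_counter,
        PySem.List.foldl_if_true_eq, PySem.Dict.items_counter]
    set segments := (List.range (words.length - 3)).map
      (fun (i : Nat) => PySem.Str.join " " (PySem.List.slice words (some (i : Int)) (some ((i : Int) + 3)))) with hseg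
    have hperm : (PySem.List.sorted segments (fun s => s) false).Perm segments :=
      PySem.List.sorted_perm segments (fun s => s) false
    have hpw : (PySem.List.sorted segments (fun s => s) false).Pairwise (· ≤ ·) :=
      PySem.List.sorted_pairwise segments (fun s => s)
    rw [Bool.false_or, List.any_map]
    apply Bool.eq_iff_iff.mpr
    simp only [List.any_eq_true, Function.comp, PySem.Set.mem_ofList, Bool.and_eq_true, decide_eq_true_eq]
    constructor
    · rintro ⟨k, hk, h2, h1⟩
      refine pvScan3_of_count _ hpw k ?_ h1
      rw [hperm.count_eq]
      have h2' : 2 < List.count k segments := by exact_mod_cast h2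
      omega
    · intro hs
      obtain ⟨k, hk3, hk1⟩ := pvScan3_exists _ hs
      rw [hperm.count_eq] at hk3
      refine ⟨k, List.count_pos_iff.mp (by omega), ?_, hk1⟩
      have : (2 : Int) < (List.count k segments : Int) := by exact_mod_cast hk3
      exact this

-- ===== VERDICT (by name: the statement is the Claim_ definition above) =====
theorem is_repetitive_spec : Claim_equal_is_repetitive := by
  intro text _
  exact is_repetitive_eq_alt text
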